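-- pv_equiv track=rewrite | github.com/avonaly/project_euler | util.py | index_of_greatest_element_less_than
-- ===== SOURCE A (Python) =====
-- import typing
--
-- def index_of_greatest_element_less_than(sorted_seq: typing.Sequence[int], upper_bound: int):
--     """
--     Returns the index of the maximum value in sorted_seq less than upper_bound.
--
--     Implements naive search
--     """
--
--     a, b = -1, len(sorted_seq)
--     while a+1 < b:
--         m = (a+b) // 2
--         if sorted_seq[m] < upper_bound:
--             a=m
--         else:
--             b=m
--
--     return a
-- ===== SOURCE B (Python) =====
-- import typing
--
-- def index_of_greatest_element_less_than(sorted_seq: typing.Sequence[int], upper_bound: int):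
--     """
--     Returns the index of the maximum value in sorted_seq less than upper_bound.
--
--     Linear forward scan: keep the last index seen whose value is below the
--     bound; stop at the first element >= upper_bound (valid: input is sorted).
--     """
--     result = -1
--     for i, x in enumerate(sorted_seq):
--         if x < upper_bound:
--             result = i
--         else:
--             break
--     return result
-- ===== Notes on version B (the rewrite author's own statement) =====
-- stated objective: simpler
-- what changed: Replaces the binary-search while-loop over half-open bounds (a,b) with a single forward scan that remembers the last index below the bound and breaks at the first element >= upper_bound.
-- outside the precondition, e.g. on index_of_greatest_element_less_than([10, 0, 1], 5): A returns 2, B returns -1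
import Mathlib
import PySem

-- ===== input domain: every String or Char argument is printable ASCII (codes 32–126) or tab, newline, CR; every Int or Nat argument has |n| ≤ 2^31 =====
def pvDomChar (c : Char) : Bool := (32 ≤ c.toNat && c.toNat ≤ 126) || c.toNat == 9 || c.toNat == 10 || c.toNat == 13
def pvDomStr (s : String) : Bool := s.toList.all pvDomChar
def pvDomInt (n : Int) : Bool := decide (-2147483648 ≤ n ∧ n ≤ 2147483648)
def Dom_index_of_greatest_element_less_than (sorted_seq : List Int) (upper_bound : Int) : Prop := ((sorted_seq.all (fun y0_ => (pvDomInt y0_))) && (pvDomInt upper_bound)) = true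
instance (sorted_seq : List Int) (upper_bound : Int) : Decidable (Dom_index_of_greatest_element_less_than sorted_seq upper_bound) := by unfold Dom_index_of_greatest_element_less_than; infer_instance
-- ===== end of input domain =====

-- B replaces A's binary-search loop by a single forward scan with early break (simpler); equal on sorted input.

-- ===== PORT A =====
-- while a+1 < b: m = (a+b)//2; if sorted_seq[m] < ub: a = m else: b = m
-- The index m always satisfies 0 <= m < len for the calls A makes, so the
-- pyGetD default 0 is never consulted (exact port of sorted_seq[m]).
def pvLoopA (seq : List Int) (ub a b : Int) : Int :=
  if _h : a + 1 < b then
    let m := PySem.Int.floordiv (a + b) 2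
    if PySem.List.pyGetD seq m 0 < ub then pvLoopA seq ub m b
    else pvLoopA seq ub a m
  else a
termination_by (b - a).toNat
decreasing_by
  all_goals
    have hm : PySem.Int.floordiv (a + b) 2 = (a + b) / 2 :=
      PySem.Int.floordiv_eq_ediv_of_pos (by omega)
    simp only [hm]
    omega

def index_of_greatest_element_less_than (sorted_seq : List Int) (upper_bound : Int) : Int :=
  pvLoopA sorted_seq upper_bound (-1) (sorted_seq.length : Int)

-- ===== PORT B =====
-- result = -1; for i, x in enumerate(seq): if x < ub: result = i else: break
def pvScanB (ub : Int) : List Int → Nat → Int → Int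
  | [], _, result => result
  | x :: rest, i, result =>
    if x < ub then pvScanB ub rest (i + 1) (i : Int) else result

def index_of_greatest_element_less_than_alt (sorted_seq : List Int) (upper_bound : Int) : Int :=
  pvScanB upper_bound sorted_seq 0 (-1)

-- ===== PRECONDITION & SPEC =====
-- Pre_ is the standard binary-search precondition (the function's natural domain —
-- the parameter is named sorted_seq): the list is partitioned by the bound, i.e. no
-- element ≥ upper_bound comes before an element < upper_bound; every sorted list
-- satisfies it.  On inputs violating it A's binary-search value depends on which
-- elements the probes happen to hit and is an artefact of A's implementation, not a
-- specifiable answer.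
def Pre_index_of_greatest_element_less_than (sorted_seq : List Int) (upper_bound : Int) : Prop :=
  List.Pairwise (fun x y => upper_bound ≤ x → upper_bound ≤ y) sorted_seq
instance (sorted_seq : List Int) (upper_bound : Int) : Decidable (Pre_index_of_greatest_element_less_than sorted_seq upper_bound) := by unfold Pre_index_of_greatest_element_less_than; infer_instance

def pvWitness_index_of_greatest_element_less_than : List Int × Int := ([1, 2, 3], 2)

def Spec_index_of_greatest_element_less_than (sorted_seq : List Int) (upper_bound : Int) (out : Int) : Prop := out = index_of_greatest_element_less_than_alt sorted_seq upper_bound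
instance (sorted_seq : List Int) (upper_bound : Int) (out : Int) : Decidable (Spec_index_of_greatest_element_less_than sorted_seq upper_bound out) := by unfold Spec_index_of_greatest_element_less_than; infer_instance

-- ===== CLAIM (what is proved, stated in full; the proofs are below) =====
def Claim_equal_index_of_greatest_element_less_than : Prop := ∀ (sorted_seq : List Int) (upper_bound : Int), Dom_index_of_greatest_element_less_than sorted_seq upper_bound → Pre_index_of_greatest_element_less_than sorted_seq upper_bound → Spec_index_of_greatest_element_less_than sorted_seq upper_bound (index_of_greatest_element_less_than sorted_seq upper_bound)

-- ===== LEMMAS AND PROOFS =====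

-- B's scan returns i + k - 1 where k is the index of the first element ≥ ub
-- (the initial result parameter when k = 0).
theorem pvScanB_eq (ub : Int) (l : List Int) : ∀ (i : Nat) (res : Int),
    pvScanB ub l i res =
      if l.findIdx (fun x => decide (ub ≤ x)) = 0 then res
      else (i : Int) + (l.findIdx (fun x => decide (ub ≤ x)) : Int) - 1 := by
  induction l with
  | nil => intro i res; simp [pvScanB]
  | cons x rest ih =>
    intro i res
    by_cases hx : x < ub
    · have hpx : (decide (ub ≤ x)) = false := by simp; omega
      have hne : (x :: rest).findIdx (fun y => decide (ub ≤ y)) =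
          rest.findIdx (fun y => decide (ub ≤ y)) + 1 := by
        have hpx : (decide (ub ≤ x)) = false := by simp; omega
        simp [List.findIdx_cons, hpx]
      rw [hne]
      simp only [pvScanB, if_pos hx, ih]
      split_ifs with h1 h2
      · exact h2.elim
      · push_cast; omega
      · rename_i hf; exact hf.elim
      · push_cast; omega
    · have hpx : (decide (ub ≤ x)) = true := by simp; omega
      simp [pvScanB, hx, List.findIdx_cons, hpx]

-- A's binary search converges to k - 1 on sorted input, under the invariant
-- a < k ≤ b with -1 ≤ a and b ≤ len.
theorem pvLoopA_eq (l : List Int) (ub : Int)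
    (hs : List.Pairwise (fun x y => ub ≤ x → ub ≤ y) l) :
    ∀ (n : Nat) (a b : Int), (b - a).toNat ≤ n →
      -1 ≤ a → b ≤ (l.length : Int) →
      a < (l.findIdx (fun x => decide (ub ≤ x)) : Int) →
      (l.findIdx (fun x => decide (ub ≤ x)) : Int) ≤ b →
      pvLoopA l ub a b = (l.findIdx (fun x => decide (ub ≤ x)) : Int) - 1 := by
  set k : Nat := l.findIdx (fun x => decide (ub ≤ x)) with hk
  have hup : ∀ (i j : Nat) (hi : i < l.length) (hj : j < l.length),
      i ≤ j → ub ≤ l[i] → ub ≤ l[j] := by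
    intro i j hi hj hij hubi
    rcases Nat.lt_or_ge i j with h | h
    · exact (List.pairwise_iff_getElem.mp hs) i j hi hj h hubi
    · have : i = j := by omega
      subst this; exact hubi
  intro n
  induction n with
  | zero => intro a b hn _ _ hak hkb; omega
  | succ n ih =>
    intro a b hn ha hb hak hkb
    rw [pvLoopA]
    split_ifs with hab
    · have hm : PySem.Int.floordiv (a + b) 2 = (a + b) / 2 :=
        PySem.Int.floordiv_eq_ediv_of_pos (by omega)
      simp only [hm]
      set m : Int := (a + b) / 2 with hmdef
      have hm1 : a < m := by omega
      have hm2 : m < b := by omega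
      have hm0 : 0 ≤ m := by omega
      have hmlen : m < (l.length : Int) := by omega
      have hget : PySem.List.pyGetD l m 0 = l[m.toNat]'(by omega) :=
        PySem.List.pyGetD_eq_getElem l 0 hm0 hmlen
      split_ifs with hcmp
      · -- l[m] < ub  ⇒  m < k
        rw [hget] at hcmp
        have hmk : m < (k : Int) := by
          by_contra hge
          have hklen : k < l.length := by omega
          have : (decide (ub ≤ l[k]'hklen)) = true := List.findIdx_getElem (w := hklen)
          have hubk : ub ≤ l[k]'hklen := of_decide_eq_true this
          have : ub ≤ l[m.toNat]'(by omega) := hup k m.toNat hklen (by omega) (by omega) hubk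
          omega
        exact ih m b (by omega) (by omega) hb hmk hkb
      · -- ub ≤ l[m]  ⇒  k ≤ m
        rw [hget] at hcmp
        have hkm : (k : Int) ≤ m := by
          by_contra hlt
          have hmk : m.toNat < k := by omega
          have : (decide (ub ≤ l[m.toNat]'(by omega))) = false := List.not_of_lt_findIdx hmk
          have : ¬ ub ≤ l[m.toNat]'(by omega) := of_decide_eq_false this
          omega
        exact ih a m (by omega) ha (by omega) hak hkm
    · -- loop done: a + 1 ≥ b and a < k ≤ b force a = k - 1
      omega

-- ===== VERDICT (by name: the statement is the Claim_ definition above) =====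
theorem index_of_greatest_element_less_than_spec : Claim_equal_index_of_greatest_element_less_than := by
  intro seq ub _ hpre
  unfold Spec_index_of_greatest_element_less_than
  unfold index_of_greatest_element_less_than index_of_greatest_element_less_than_alt
  rw [pvScanB_eq]
  have hklen := List.findIdx_le_length (p := fun x => decide (ub ≤ x)) (xs := seq)
  rw [pvLoopA_eq seq ub hpre ((seq.length : Int) - (-1)).toNat (-1) (seq.length : Int)
      (by omega) (by omega) (by omega) (by omega) (by exact_mod_cast hklen)]
  split_ifs with h0
  · simp [h0]
  · omega
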